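-- pv_equiv track=rewrite | github.com/drinkingtheink/platform | intertwine/trackable/utils.py | dehumpify
-- ===== SOURCE A (Python) =====
-- ord_A = ord('A')
--
-- ord_Z = ord('Z')
--
-- ord_a = ord('a')
--
-- ord_z = ord('z')
--
-- def dehumpify(camelcase):
--     '''Emit strings by progressively removing camel humps from end'''
--     length = len(camelcase)
--     for i, c in enumerate(reversed(camelcase), start=1):
--         following_idx = length - i + 1
--         followed_by_lower = (following_idx < length and
--                              ord_a <= ord(camelcase[following_idx]) <= ord_z)
--         is_upper = ord_A <= ord(c) <= ord_Z
--         preceding_idx = length - i - 1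
--         preceded_by_upper = (preceding_idx > -1 and
--                              ord_A <= ord(camelcase[preceding_idx]) <= ord_Z)
--         if is_upper and (followed_by_lower or not preceded_by_upper):
--             yield camelcase[:-i]
-- ===== SOURCE B (Python) =====
-- def dehumpify(camelcase):
--     '''Emit strings by progressively removing camel humps from end'''
--     # Forward single pass: record each hump-boundary index, carrying whether the
--     # previous character was uppercase; then emit prefixes from the last boundary back.
--     starts = []
--     prev_is_upper = False
--     for j, c in enumerate(camelcase):
--         if 'A' <= c <= 'Z':
--             followed_by_lower = (j + 1 < len(camelcase)
--                                  and 'a' <= camelcase[j + 1] <= 'z')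
--             if followed_by_lower or not prev_is_upper:
--                 starts.append(j)
--             prev_is_upper = True
--         else:
--             prev_is_upper = False
--     for start in reversed(starts):
--         yield camelcase[:start]
-- ===== Notes on version B (the rewrite author's own statement) =====
-- stated objective: simpler
-- what changed: A walks the string backwards with enumerate(reversed(...)) and re-derives each neighbour by index arithmetic with bounds checks; B makes one forward pass that carries whether the previous character was uppercase, collects the boundary indices, and then emits the prefixes in reverse.
import Mathlib
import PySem

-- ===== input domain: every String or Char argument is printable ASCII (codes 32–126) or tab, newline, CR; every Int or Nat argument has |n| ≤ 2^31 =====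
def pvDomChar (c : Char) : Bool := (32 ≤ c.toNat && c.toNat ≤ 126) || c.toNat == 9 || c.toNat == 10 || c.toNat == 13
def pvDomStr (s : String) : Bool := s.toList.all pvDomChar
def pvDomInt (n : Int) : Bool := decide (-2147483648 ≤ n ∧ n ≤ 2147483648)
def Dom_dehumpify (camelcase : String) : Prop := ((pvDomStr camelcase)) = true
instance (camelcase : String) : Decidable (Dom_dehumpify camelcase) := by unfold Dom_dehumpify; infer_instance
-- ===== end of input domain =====

-- B replaces A's backward loop with index fiddling by a forward scan that carries the
-- previous character's case and collects boundary indices, then emits prefixes in reverse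
-- (objective: simpler). Both are ported as producing the list of yielded strings.

-- ===== PORT A =====
def ord_A : Nat := 'A'.toNat
def ord_Z : Nat := 'Z'.toNat
def ord_a : Nat := 'a'.toNat
def ord_z : Nat := 'z'.toNat

def dehumpify (camelcase : String) : List String :=
  let length : Int := PySem.Str.len camelcase
  (PySem.List.enumerate camelcase.toList.reverse 1).foldl
    (fun acc ic =>
      let i := ic.1
      let c := ic.2
      let following_idx := length - i + 1
      let followed_by_lower :=
        decide (following_idx < length) &&
          (match PySem.Str.pyGet? camelcase following_idx with
           | some ch => decide (ord_a ≤ ch.toNat ∧ ch.toNat ≤ ord_z)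
           | none => false)
      let is_upper := decide (ord_A ≤ c.toNat ∧ c.toNat ≤ ord_Z)
      let preceding_idx := length - i - 1
      let preceded_by_upper :=
        decide (preceding_idx > -1) &&
          (match PySem.Str.pyGet? camelcase preceding_idx with
           | some ch => decide (ord_A ≤ ch.toNat ∧ ch.toNat ≤ ord_Z)
           | none => false)
      if is_upper && (followed_by_lower || !preceded_by_upper)
      then acc ++ [PySem.Str.slice camelcase none (some (-i))]
      else acc) []

-- ===== PORT B =====
def dehumpify_alt (camelcase : String) : List String :=
  let res := (PySem.List.enumerate camelcase.toList 0).foldl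
    (fun (st : List Int × Bool) jc =>
      let j := jc.1
      let c := jc.2
      if decide ('A' ≤ c ∧ c ≤ 'Z') then
        let followed_by_lower :=
          decide (j + 1 < PySem.Str.len camelcase) &&
            (match PySem.Str.pyGet? camelcase (j + 1) with
             | some ch => decide ('a' ≤ ch ∧ ch ≤ 'z')
             | none => false)
        if followed_by_lower || !st.2 then (st.1 ++ [j], true) else (st.1, true)
      else (st.1, false)) ([], false)
  res.1.reverse.map (fun start => PySem.Str.slice camelcase none (some start))

-- ===== PRECONDITION & SPEC =====
def Spec_dehumpify (camelcase : String) (out : List String) : Prop := out = dehumpify_alt camelcase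
instance (camelcase : String) (out : List String) : Decidable (Spec_dehumpify camelcase out) := by unfold Spec_dehumpify; infer_instance

-- ===== CLAIM (what is proved, stated in full; the proofs are below) =====
def Claim_equal_dehumpify : Prop := ∀ (camelcase : String), Dom_dehumpify camelcase → Spec_dehumpify camelcase (dehumpify camelcase)

-- ===== LEMMAS AND PROOFS =====

def pvUp (c : Char) : Bool := decide (ord_A ≤ c.toNat ∧ c.toNat ≤ ord_Z)
def pvLow (c : Char) : Bool := decide (ord_a ≤ c.toNat ∧ c.toNat ≤ ord_z)

-- the hump-boundary condition at forward index j
def pvCond (cs : List Char) (j : Nat) : Bool :=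
  pvUp (cs.getD j ' ') &&
    ((decide (j + 1 < cs.length) && pvLow (cs.getD (j + 1) ' ')) ||
     !(decide (0 < j) && pvUp (cs.getD (j - 1) ' ')))

-- A's loop test and yielded value, as functions of the (i, c) pair
def pvP (s : String) (ic : Int × Char) : Bool :=
  let length : Int := PySem.Str.len s
  let i := ic.1
  let c := ic.2
  let following_idx := length - i + 1
  let followed_by_lower :=
    decide (following_idx < length) &&
      (match PySem.Str.pyGet? s following_idx with
       | some ch => decide (ord_a ≤ ch.toNat ∧ ch.toNat ≤ ord_z)
       | none => false)
  let is_upper := decide (ord_A ≤ c.toNat ∧ c.toNat ≤ ord_Z)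
  let preceding_idx := length - i - 1
  let preceded_by_upper :=
    decide (preceding_idx > -1) &&
      (match PySem.Str.pyGet? s preceding_idx with
       | some ch => decide (ord_A ≤ ch.toNat ∧ ch.toNat ≤ ord_Z)
       | none => false)
  is_upper && (followed_by_lower || !preceded_by_upper)

def pvF (s : String) (ic : Int × Char) : String :=
  PySem.Str.slice s none (some (-ic.1))

-- B's loop step as a function
def pvStepB (s : String) (st : List Int × Bool) (jc : Int × Char) : List Int × Bool :=
  let j := jc.1
  let c := jc.2
  if decide ('A' ≤ c ∧ c ≤ 'Z') then
    let followed_by_lower :=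
      decide (j + 1 < PySem.Str.len s) &&
        (match PySem.Str.pyGet? s (j + 1) with
         | some ch => decide ('a' ≤ ch ∧ ch ≤ 'z')
         | none => false)
    if followed_by_lower || !st.2 then (st.1 ++ [j], true) else (st.1, true)
  else (st.1, false)

-- "previous character (before index k) is uppercase"
def pvPrev (cs : List Char) (k : Nat) : Bool := decide (0 < k) && pvUp (cs.getD (k - 1) ' ')

lemma pv_charle_up (c : Char) : decide ('A' ≤ c ∧ c ≤ 'Z') = pvUp c := by
  unfold pvUp ord_A ord_Z
  rw [decide_eq_decide]
  simp [Char.le_def, UInt32.le_iff_toNat_le, Char.toNat_val]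

-- the common reference value
def pvRef (s : String) : List String :=
  ((List.range s.toList.length).filter (pvCond s.toList)).reverse.map
    (fun j => PySem.Str.slice s none (some ((j : Nat) : Int)))

lemma enum_rev (cs : List Char) :
    PySem.List.enumerate cs.reverse 1 =
      ((List.range cs.length).reverse).map
        (fun j => (((cs.length - j : Nat) : Int), cs.getD j ' ')) := by
  apply List.ext_getElem
  · simp [PySem.List.length_enumerate]
  · intro k h1 h2
    rw [PySem.List.getElem_enumerate]
    simp only [List.getElem_map, List.getElem_reverse, List.getElem_range, List.length_range]
    simp only [PySem.List.length_enumerate, List.length_reverse] at h1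
    have e1 : cs.length - (cs.length - 1 - k) = k + 1 := by omega
    have e2 : cs.length - 1 - k < cs.length := by omega
    refine Prod.ext ?_ ?_
    · simp only [e1]
      push_cast
      ring
    · simp only [List.getD_eq_getElem _ _ e2]

lemma pvP_eq (s : String) (j : Nat) (hj : j < s.toList.length) :
    pvP s (((s.toList.length - j : Nat) : Int), s.toList.getD j ' ') = pvCond s.toList j := by
  simp only [pvP, pvCond, PySem.Str.len_eq]
  have e1 : (s.toList.length : Int) - ((s.toList.length - j : Nat) : Int) + 1
      = ((j + 1 : Nat) : Int) := by
    push_cast [Nat.cast_sub hj.le]; ring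
  have e2 : (s.toList.length : Int) - ((s.toList.length - j : Nat) : Int) - 1
      = (j : Int) - 1 := by
    push_cast [Nat.cast_sub hj.le]; ring
  simp only [e1, e2]
  rw [PySem.Str.pyGet?_natCast]
  have hfg : decide (((j + 1 : Nat) : Int) < (s.toList.length : Int))
      = decide (j + 1 < s.toList.length) := by
    rw [decide_eq_decide]; exact_mod_cast Iff.rfl
  simp only [hfg]
  have hpg : decide ((j : Int) - 1 > -1) = decide (0 < j) := by
    rw [decide_eq_decide]; omega
  simp only [hpg]
  by_cases h2 : j + 1 < s.toList.length
  · rw [List.getElem?_eq_getElem h2, List.getD_eq_getElem _ _ h2]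
    by_cases h0 : 0 < j
    · have e3 : (j : Int) - 1 = ((j - 1 : Nat) : Int) := by omega
      rw [e3, PySem.Str.pyGet?_natCast,
        List.getElem?_eq_getElem (by omega : j - 1 < s.toList.length),
        List.getD_eq_getElem _ _ (by omega : j - 1 < s.toList.length)]
      simp [pvUp, pvLow]
    · simp only [Nat.not_lt, Nat.le_zero] at h0
      subst h0
      simp [pvUp, pvLow, PySem.Str.pyGet?]
  · rw [List.getElem?_eq_none (by omega)]
    simp only [decide_eq_false (by omega : ¬ (j + 1 < s.toList.length)), Bool.false_and]
    by_cases h0 : 0 < j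
    · have e3 : (j : Int) - 1 = ((j - 1 : Nat) : Int) := by omega
      rw [e3, PySem.Str.pyGet?_natCast,
        List.getElem?_eq_getElem (by omega : j - 1 < s.toList.length),
        List.getD_eq_getElem _ _ (by omega : j - 1 < s.toList.length)]
      simp [pvUp]
    · simp only [Nat.not_lt, Nat.le_zero] at h0
      subst h0
      simp [pvUp, PySem.Str.pyGet?]

lemma pvF_eq (s : String) (j : Nat) (hj : j < s.toList.length) :
    pvF s (((s.toList.length - j : Nat) : Int), s.toList.getD j ' ') =
      PySem.Str.slice s none (some ((j : Nat) : Int)) := by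
  unfold pvF
  apply String.toList_inj.mp
  rw [PySem.Str.toList_slice, PySem.Str.toList_slice]
  unfold PySem.Chars.slice
  rw [PySem.List.slice_to_neg_natCast s.toList (s.toList.length - j) (by omega),
      PySem.List.slice_to_natCast]
  congr 1
  omega

lemma A_eq (s : String) : dehumpify s = pvRef s := by
  show (PySem.List.enumerate s.toList.reverse 1).foldl
      (fun acc ic => if pvP s ic then acc ++ [pvF s ic] else acc) [] = pvRef s
  rw [PySem.List.foldl_append_if, enum_rev, List.filter_map, List.map_map, List.nil_append]
  rw [List.filter_congr (q := fun j => pvCond s.toList j)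
    (by
      intro j hj
      rw [List.mem_reverse, List.mem_range] at hj
      exact pvP_eq s j hj)]
  rw [List.filter_reverse]
  unfold pvRef
  apply List.map_congr_left
  intro j hj
  rw [List.mem_reverse, List.mem_filter, List.mem_range] at hj
  exact pvF_eq s j hj.1

lemma B_fold (s : String) (l : List Char) (k : Nat) (acc : List Int)
    (hd : s.toList.drop k = l) (hk : k ≤ s.toList.length) :
    (PySem.List.enumerate l (k : Int)).foldl (pvStepB s) (acc, pvPrev s.toList k) =
      (acc ++ ((List.range' k (s.toList.length - k)).filter (pvCond s.toList)).map
        (fun j => ((j : Nat) : Int)),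
       pvPrev s.toList s.toList.length) := by
  induction l generalizing k acc with
  | nil =>
    have hkn : k = s.toList.length := by
      have := congrArg List.length hd
      simp only [List.length_drop, List.length_nil] at this
      omega
    subst hkn
    simp [PySem.List.enumerate_nil]
  | cons c l' ih =>
    have hlen := congrArg List.length hd
    simp only [List.length_drop, List.length_cons] at hlen
    have hlt : k < s.toList.length := by omega
    have hck : s.toList.getD k ' ' = c := by
      have h1 : s.toList[k]? = some c := by
        have h : (s.toList.drop k)[0]? = some c := by rw [hd]; rfl
        simpa using h
      rw [List.getD_eq_getElem _ _ hlt]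
      exact Option.some_injective _ ((List.getElem?_eq_getElem hlt).symm.trans h1)
    have hdrop : s.toList.drop (k + 1) = l' := by
      have := congrArg (List.drop 1) hd
      rw [List.drop_drop] at this
      simpa [Nat.add_comm] using this
    rw [PySem.List.enumerate_cons, List.foldl_cons]
    have hcast : (k : Int) + 1 = ((k + 1 : Nat) : Int) := by push_cast; ring
    have hfl : (decide ((k : Int) + 1 < PySem.Str.len s) &&
        (match PySem.Str.pyGet? s ((k : Int) + 1) with
         | some ch => decide ('a' ≤ ch ∧ ch ≤ 'z')
         | none => false)) =
        (decide (k + 1 < s.toList.length) && pvLow (s.toList.getD (k + 1) ' ')) := by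
      rw [PySem.Str.len_eq, hcast, PySem.Str.pyGet?_natCast]
      have hdg : decide (((k + 1 : Nat) : Int) < (s.toList.length : Int))
          = decide (k + 1 < s.toList.length) := by
        rw [decide_eq_decide]; exact_mod_cast Iff.rfl
      rw [hdg]
      by_cases h2 : k + 1 < s.toList.length
      · rw [List.getElem?_eq_getElem h2, List.getD_eq_getElem _ _ h2]
        congr 1
      · rw [List.getElem?_eq_none (by omega), decide_eq_false h2]
        rfl
    have hprev1 : pvPrev s.toList (k + 1) = pvUp c := by
      unfold pvPrev
      rw [Nat.add_sub_cancel, hck]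
      simp
    have hrange : List.range' k (s.toList.length - k) =
        k :: List.range' (k + 1) (s.toList.length - (k + 1)) := by
      have : s.toList.length - k = (s.toList.length - (k + 1)) + 1 := by omega
      rw [this, List.range'_succ]
    have hcondk : pvCond s.toList k =
        (pvUp c && ((decide (k + 1 < s.toList.length) && pvLow (s.toList.getD (k + 1) ' '))
          || !pvPrev s.toList k)) := by
      unfold pvCond pvPrev
      rw [hck]
    show (PySem.List.enumerate l' ((k : Int) + 1)).foldl (pvStepB s)
        (pvStepB s (acc, pvPrev s.toList k) ((k : Int), c)) = _
    rw [hcast]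
    have hstep : pvStepB s (acc, pvPrev s.toList k) ((k : Int), c) =
        if pvUp c then
          (if (decide (k + 1 < s.toList.length) && pvLow (s.toList.getD (k + 1) ' ')
              || !pvPrev s.toList k)
           then (acc ++ [(k : Int)], true) else (acc, true))
        else (acc, false) := by
      unfold pvStepB
      simp only []
      rw [pv_charle_up, hfl]
    rw [hstep]
    cases hup : pvUp c with
    | false =>
      simp only [Bool.false_eq_true, if_false]
      have hstate : ((acc : List Int), false) = (acc, pvPrev s.toList (k + 1)) := by
        rw [hprev1, hup]
      rw [hstate, ih (k + 1) acc hdrop (by omega), hrange]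
      rw [List.filter_cons_of_neg (by rw [hcondk, hup]; simp)]
    | true =>
      simp only [if_true]
      cases hcnd : (decide (k + 1 < s.toList.length) && pvLow (s.toList.getD (k + 1) ' ')
          || !pvPrev s.toList k) with
      | false =>
        simp only [Bool.false_eq_true, if_false]
        have hstate : ((acc : List Int), true) = (acc, pvPrev s.toList (k + 1)) := by
          rw [hprev1, hup]
        rw [hstate, ih (k + 1) acc hdrop (by omega), hrange]
        rw [List.filter_cons_of_neg (by rw [hcondk, hup, hcnd]; simp)]
      | true =>
        simp only [if_true]
        have hstate : (acc ++ [(k : Int)], true) = (acc ++ [(k : Int)], pvPrev s.toList (k + 1)) := by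
          rw [hprev1, hup]
        rw [hstate, ih (k + 1) (acc ++ [(k : Int)]) hdrop (by omega), hrange]
        rw [List.filter_cons_of_pos (by rw [hcondk, hup, hcnd]; simp)]
        simp [List.append_assoc]

lemma B_eq (s : String) : dehumpify_alt s = pvRef s := by
  show (((PySem.List.enumerate s.toList 0).foldl (pvStepB s) ([], false)).1).reverse.map
      (fun start => PySem.Str.slice s none (some start)) = pvRef s
  have h0 : (([] : List Int), false) = (([] : List Int), pvPrev s.toList 0) := by
    simp [pvPrev]
  rw [h0]
  have hb := B_fold s s.toList 0 [] (by simp) (by omega)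
  rw [show ((0 : Nat) : Int) = (0 : Int) from rfl] at hb
  rw [hb]
  simp only [List.nil_append, Nat.sub_zero, ← List.range_eq_range']
  rw [← List.map_reverse, List.map_map]
  rfl

-- ===== VERDICT (by name: the statement is the Claim_ definition above) =====
theorem dehumpify_spec : Claim_equal_dehumpify := by
  intro s _
  unfold Spec_dehumpify
  rw [A_eq, B_eq]
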